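-- pv_equiv track=rewrite | github.com/cuiy0006/CompositeKeysFinder | common.py | setToPrintSet
-- ===== SOURCE A (Python) =====
-- def setToPrintSet(s, depth):
--       pSet = []
--       for key in s:
--             printKey = []
--             for _ in range(depth):
--                   if key & 1 == 1:
--                         printKey.append('1')
--                   else:
--                         printKey.append('0')
--                   key = key >> 1
--             pSet.append(''.join(printKey))
--       return pSet
-- ===== SOURCE B (Python) =====
-- def setToPrintSet(s, depth):
--     if depth <= 0:
--         return ['' for _ in s]
--     mask = (1 << depth) - 1
--     fmt = '0{}b'.format(depth)
--     return [format(key & mask, fmt)[::-1] for key in s]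
-- ===== Notes on version B (the rewrite author's own statement) =====
-- stated objective: idiomatic
-- what changed: A's hand-rolled per-bit inner loop (test key&1, shift, append, join) is replaced by masking the key to its low depth bits and using Python's zero-padded binary string formatting plus a reverse; no per-bit Python-level loop remains.
import Mathlib
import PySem

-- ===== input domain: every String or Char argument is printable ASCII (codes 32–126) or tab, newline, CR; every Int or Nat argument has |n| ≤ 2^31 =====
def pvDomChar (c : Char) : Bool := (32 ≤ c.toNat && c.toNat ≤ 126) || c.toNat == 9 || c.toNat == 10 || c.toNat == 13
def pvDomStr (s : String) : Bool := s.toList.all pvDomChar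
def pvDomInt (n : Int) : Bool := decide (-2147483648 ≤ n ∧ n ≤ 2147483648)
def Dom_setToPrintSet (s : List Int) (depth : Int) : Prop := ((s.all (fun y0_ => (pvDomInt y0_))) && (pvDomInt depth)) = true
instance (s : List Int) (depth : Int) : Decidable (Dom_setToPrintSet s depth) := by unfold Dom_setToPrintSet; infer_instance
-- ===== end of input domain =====

-- B replaces A's per-bit inner loop by masking the key to its low `depth` bits and
-- binary-formatting the masked value (zero-padded, then reversed); idiomatic rewrite.

-- ===== PORT A =====
-- literal port of A: for each key, depth iterations of (emit key & 1; key >>= 1), LSB first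
def setToPrintSet (s : List Int) (depth : Int) : List String :=
  s.foldl (fun pSet key =>
    let st := (PySem.List.pyRange 0 depth 1).foldl
      (fun (st : Int × List Char) _ =>
        (st.1 >>> (1:Nat), st.2 ++ [if PySem.Int.band st.1 1 == 1 then '1' else '0']))
      (key, [])
    pSet ++ [String.mk st.2]) []

-- ===== PORT B =====
-- binary digits of n, most significant first; binDigits 0 = [] (format(n,'b') for n > 0)
def binDigits (n : Nat) : List Char :=
  if h : n = 0 then [] else binDigits (n / 2) ++ [if n % 2 == 1 then '1' else '0']
decreasing_by exact Nat.div_lt_self (Nat.pos_of_ne_zero h) (by decide)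

-- format(m, '0{d}b'): digits of m (with '0' for m = 0), zero-padded on the left to width d
def fmtBin (d : Nat) (m : Nat) : List Char :=
  let ds := if m = 0 then ['0'] else binDigits m
  List.replicate (d - ds.length) '0' ++ ds

-- port of B; `key & mask` is nonnegative (mask ≥ 0), so `.toNat` after PySem.Int.band is exact
def setToPrintSet_alt (s : List Int) (depth : Int) : List String :=
  if depth ≤ 0 then s.map (fun _ => "")
  else
    let d := depth.toNat
    let mask : Int := (1 <<< d) - 1
    s.map (fun key => String.mk ((fmtBin d (PySem.Int.band key mask).toNat).reverse))

-- ===== PRECONDITION & SPEC =====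
def Spec_setToPrintSet (s : List Int) (depth : Int) (out : List String) : Prop := out = setToPrintSet_alt s depth
instance (s : List Int) (depth : Int) (out : List String) : Decidable (Spec_setToPrintSet s depth out) := by unfold Spec_setToPrintSet; infer_instance

-- ===== CLAIM (what is proved, stated in full; the proofs are below) =====
def Claim_equal_setToPrintSet : Prop := ∀ (s : List Int) (depth : Int), Dom_setToPrintSet s depth → Spec_setToPrintSet s depth (setToPrintSet s depth)

-- ===== LEMMAS AND PROOFS =====

-- the chars A's inner loop produces, as a recursion on the bit count
def lsb : Int → Nat → List Char
  | _, 0 => []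
  | k, d+1 => (if PySem.Int.band k 1 == 1 then '1' else '0') :: lsb (k >>> (1:Nat)) d

-- the same recursion on the masked natural number
def lsbNat : Nat → Nat → List Char
  | _, 0 => []
  | m, d+1 => (if m % 2 == 1 then '1' else '0') :: lsbNat (m / 2) d

theorem foldl_inner (l : List Int) : ∀ (k : Int) (cs : List Char),
    (l.foldl (fun (st : Int × List Char) _ =>
      (st.1 >>> (1:Nat), st.2 ++ [if PySem.Int.band st.1 1 == 1 then '1' else '0'])) (k, cs)).2
    = cs ++ lsb k l.length := by
  induction l with
  | nil => intro k cs; simp [lsb]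
  | cons x xs ih =>
    intro k cs
    rw [List.length_cons, lsb, List.foldl_cons]
    exact (ih (k >>> (1:Nat)) (cs ++ [if PySem.Int.band k 1 == 1 then '1' else '0'])).trans (by simp)

-- Python's  k & (2^d - 1)  is the floor remainder  k % 2^d, for every integer k
theorem band_mask (k : Int) (d : Nat) :
    PySem.Int.band k (((2 ^ d : Nat) : Int) - 1) = k % ((2 ^ d : Nat) : Int) := by
  set N : Nat := 2 ^ d with hNdef
  have hN : 0 < N := Nat.two_pow_pos d
  have hmask : (0:Int) ≤ (N:Int) - 1 := by omega
  have h1 : ((N:Int) - 1).toNat = N - 1 := by omega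
  by_cases hk : (0:Int) ≤ k
  · rw [PySem.Int.band_of_nonneg hk hmask, h1, Nat.and_two_pow_sub_one_eq_mod]
    have h2 : (↑(k.toNat % N) : Int) = ↑k.toNat % ↑N := by push_cast; ring
    rw [hNdef] at h2 ⊢
    rw [h2, Int.toNat_of_nonneg hk]
  · rw [PySem.Int.band]
    simp only [hk, if_false, if_pos hmask]
    set K : Nat := (-k - 1).toNat with hKdef
    have hKk : (K : Int) = -k - 1 := by omega
    have hland : ((N:Int) - 1).toNat &&& K = K % N := by
      rw [h1, Nat.land_comm]
      have := Nat.and_two_pow_sub_one_eq_mod K d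
      rw [← hNdef] at this; exact this
    rw [hland, h1]
    have hdm : (N:Int) * ((K/N : Nat):Int) + ((K%N : Nat):Int) = (K:Int) := by
      exact_mod_cast congrArg (Nat.cast : Nat → Int) (Nat.div_add_mod K N)
    have hlt : ((K % N : Nat):Int) < N := by exact_mod_cast Nat.mod_lt _ hN
    have hcast : ((N - 1 - K % N : Nat) : Int) = (N:Int) - 1 - ((K % N : Nat) : Int) := by omega
    rw [hcast]
    have hexp : (N:Int) * (-((K/N : Nat):Int) - 1) = -((N:Int) * ((K/N : Nat):Int)) - N := by ring
    have hkeq : k = ((N:Int) - 1 - ((K % N : Nat):Int)) + (N:Int) * (-((K/N : Nat):Int) - 1) := by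
      rw [hexp]; omega
    rw [hkeq, Int.add_mul_emod_self_left, Int.emod_eq_of_lt (by omega) (by omega)]

theorem lsb_eq_lsbNat (d : Nat) : ∀ k : Int, lsb k d = lsbNat ((k % ((2^d : Nat) : Int)).toNat) d := by
  induction d with
  | zero => intro k; rfl
  | succ d ih =>
    intro k
    set N : Nat := 2^d with hNdef
    have hN : 0 < N := Nat.two_pow_pos d
    have hM : ((2^(d+1) : Nat) : Int) = 2 * (N:Int) := by rw [hNdef]; push_cast; ring
    have hpos : (0:Int) < 2 * (N:Int) := by positivity
    set r : Int := k % (2*(N:Int)) with hrdef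
    have hr0 : 0 ≤ r := Int.emod_nonneg k (by omega)
    have hrlt : r < 2*(N:Int) := Int.emod_lt_of_pos k hpos
    have hband : PySem.Int.band k 1 = r % 2 := by
      rw [PySem.Int.band_one, PySem.Int.mod_eq_emod_of_pos (by norm_num)]
      rw [hrdef, Int.emod_emod_of_dvd k ⟨(N:Int), rfl⟩]
    have hkeq : k = r + ((N:Int) * (k / (2*(N:Int)))) * 2 := by
      have := Int.emod_add_ediv k (2*(N:Int))
      rw [← hrdef] at this
      nlinarith [this]
    have hk2 : k / 2 = r/2 + (N:Int) * (k / (2*(N:Int))) := by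
      conv_lhs => rw [hkeq]
      rw [Int.add_mul_ediv_right _ _ (by norm_num : (2:Int) ≠ 0)]
    have hdiv : k >>> (1:Nat) = k / 2 := by
      have := Int.shiftRight_eq_div_pow k 1
      simpa using this
    have hmodN : (k / 2) % (N:Int) = r / 2 := by
      rw [hk2, Int.add_mul_emod_self_left, Int.emod_eq_of_lt (by omega) (by omega)]
    show (if PySem.Int.band k 1 == 1 then '1' else '0') :: lsb (k >>> (1:Nat)) d
        = (if (k % ((2^(d+1) : Nat) : Int)).toNat % 2 == 1 then '1' else '0')
          :: lsbNat ((k % ((2^(d+1) : Nat) : Int)).toNat / 2) d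
    rw [hM, ← hrdef, hdiv, ih (k/2), hband, hmodN]
    have h1 : (r.toNat % 2 == 1) = (r % 2 == 1) := by
      by_cases h : r % 2 = 1
      · simp [h, show r.toNat % 2 = 1 by omega]
      · simp [h, show r.toNat % 2 ≠ 1 by omega]
    have h2 : (r/2).toNat = r.toNat / 2 := by omega
    rw [h1, h2]

theorem lsbNat_eq (d : Nat) : ∀ m : Nat, m < 2 ^ d →
    lsbNat m d = (binDigits m).reverse ++ List.replicate (d - (binDigits m).length) '0' := by
  induction d with
  | zero => intro m hm; interval_cases m; simp [lsbNat, binDigits]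
  | succ d ih =>
    intro m hm
    by_cases h0 : m = 0
    · subst h0
      rw [lsbNat, ih 0 (Nat.two_pow_pos d)]
      simp [binDigits, List.replicate_succ]
    · have hb : binDigits m = binDigits (m/2) ++ [if m % 2 == 1 then '1' else '0'] := by
        rw [binDigits.eq_def]; simp [h0]
      rw [lsbNat, ih (m/2) (by omega), hb]
      simp [List.reverse_append, Nat.succ_sub_succ]

theorem perKey (k : Int) (d : Nat) (hd : 1 ≤ d) :
    lsb k d = (fmtBin d (PySem.Int.band k ((1 <<< d) - 1)).toNat).reverse := by
  rw [Nat.one_shiftLeft, band_mask]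
  set m : Nat := (k % ((2^d : Nat) : Int)).toNat with hmdef
  have hm : m < 2^d := by
    have h0 : 0 ≤ k % ((2^d : Nat) : Int) := Int.emod_nonneg k (by positivity)
    have h1 : k % ((2^d : Nat) : Int) < ((2^d : Nat) : Int) :=
      Int.emod_lt_of_pos k (by exact_mod_cast Nat.two_pow_pos d)
    omega
  rw [lsb_eq_lsbNat d k, ← hmdef, lsbNat_eq d m hm, fmtBin]
  by_cases h0 : m = 0
  · rw [h0]
    simp only [if_pos rfl, show binDigits 0 = [] from by rw [binDigits.eq_def]; simp]
    rw [List.reverse_append]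
    simp [List.reverse_replicate]
    rw [← List.replicate_succ]
    congr 1
    omega
  · simp only [if_neg h0]
    rw [List.reverse_append, List.reverse_replicate]

theorem foldl_map (g : Int → String) (s : List Int) : ∀ acc : List String,
    s.foldl (fun pSet key => pSet ++ [g key]) acc = acc ++ s.map g := by
  induction s with
  | nil => simp
  | cons x xs ih => intro acc; simp [List.foldl, ih]

theorem setToPrintSet_as_map (s : List Int) (depth : Int) :
    setToPrintSet s depth = s.map (fun key => String.mk (lsb key depth.toNat)) := by
  unfold setToPrintSet
  have h := foldl_map (fun key => String.mk
    (((PySem.List.pyRange 0 depth 1).foldl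
      (fun (st : Int × List Char) _ =>
        (st.1 >>> (1:Nat), st.2 ++ [if PySem.Int.band st.1 1 == 1 then '1' else '0']))
      (key, [])).2)) s []
  rw [show (depth.toNat) = (PySem.List.pyRange 0 depth 1).length by
    rw [PySem.List.length_pyRange_one]; omega]
  refine h.trans ?_
  simp only [List.nil_append]
  exact List.map_congr_left (fun key _ => by rw [foldl_inner]; simp)

-- ===== VERDICT (by name: the statement is the Claim_ definition above) =====
theorem setToPrintSet_spec : Claim_equal_setToPrintSet := by
  intro s depth _
  show setToPrintSet s depth = setToPrintSet_alt s depth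
  rw [setToPrintSet_as_map]
  unfold setToPrintSet_alt
  by_cases h : depth ≤ 0
  · rw [if_pos h]
    refine List.map_congr_left (fun key _ => ?_)
    rw [show depth.toNat = 0 by omega]
    rfl
  · rw [if_neg h]
    refine List.map_congr_left (fun key _ => ?_)
    rw [perKey key depth.toNat (by omega)]
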